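-- pv_equiv track=rewrite | github.com/handsupmin/coding-test | Problems/LQ2.py | solution
-- ===== SOURCE A (Python) =====
-- from collections import defaultdict
--
-- def solution(research, n, k):
--     n_list = len(research)
--     best_keyword = defaultdict(int)
--     keywords = defaultdict(int)
--
--     date = 0
--     for value in research:
--         date += 1
--         for i in range(len(value)):
--             keywords[(date, value[i])] += 1
--
--     keys = list(keywords.keys())
--
--     for key in keys:
--         num = keywords[key]
--         day, char = key
--         count = 0
--         total = 0
--         if num >= k and (day + n <= n_list + 1):
--             total += num
--             count += 1
--             for i in range(1, n):
--                 next_key = ((day + i), char)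
--                 if next_key in keys and keywords[next_key] >= k:
--                     total += keywords[next_key]
--                     count += 1
--                     continue
--                 else:
--                     break
--
--         if count == n and total >= 2 * n * k:
--             best_keyword[char] += 1
--
--     if len(best_keyword) == 0:
--         return "None"
--
--     maximum = max(list(best_keyword.values()))
--
--     lists = sorted(list(best_keyword.keys()))
--
--     for value in lists:
--         if best_keyword[value] == maximum:
--             return value
-- ===== SOURCE B (Python) =====
-- def solution(research, n, k):
--     # Different algorithm: per-character day->count tables, then prefix sums
--     # and a back-to-front run-length table of qualifying days; each start day
--     # is decided from those two tables instead of re-walking its window.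
--     m = len(research)
--     per_char = {}
--     for day, s in enumerate(research, 1):
--         for c in s:
--             cnt = per_char.setdefault(c, {})
--             cnt[day] = cnt.get(day, 0) + 1
--     if n < 1:
--         return "None"
--     best = {}
--     for c in sorted(per_char):
--         cnt = per_char[c]
--         # pre[d] = total occurrences of c on days 1..d
--         pre = {0: 0}
--         for d in range(1, m + 1):
--             pre[d] = pre[d - 1] + cnt.get(d, 0)
--         # run[d] = length of the maximal streak of days starting at d on
--         # which c occurs and occurs at least k times
--         run = {m + 1: 0}
--         for d in range(m, 0, -1):
--             run[d] = run[d + 1] + 1 if d in cnt and cnt[d] >= k else 0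
--         t = 0
--         for d in range(1, m - n + 2):
--             if run[d] >= n and pre[d + n - 1] - pre[d - 1] >= 2 * n * k:
--                 t += 1
--         if t:
--             best[c] = t
--     if not best:
--         return "None"
--     top = max(best.values())
--     for c in best:
--         if best[c] == top:
--             return c
-- ===== Notes on version B (the rewrite author's own statement) =====
-- stated objective: alternative
-- what changed: Replaces A's scan over (day,char) keys with an inner per-window re-walk (and list membership tests) by per-character day-count tables plus prefix sums and a back-to-front run-length table of qualifying days, so each window start is decided by two table lookups.
-- intended difference: On n = 0 with some character occurring fewer than k times on some day, A's count==n gate fires vacuously and A returns the char with most such sub-threshold days, while B returns "None", the intended answer since there are no length-0 qualifying streaks. — e.g. on solution(["a"], 0, 2): A returns "a", B returns "None"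
import Mathlib
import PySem

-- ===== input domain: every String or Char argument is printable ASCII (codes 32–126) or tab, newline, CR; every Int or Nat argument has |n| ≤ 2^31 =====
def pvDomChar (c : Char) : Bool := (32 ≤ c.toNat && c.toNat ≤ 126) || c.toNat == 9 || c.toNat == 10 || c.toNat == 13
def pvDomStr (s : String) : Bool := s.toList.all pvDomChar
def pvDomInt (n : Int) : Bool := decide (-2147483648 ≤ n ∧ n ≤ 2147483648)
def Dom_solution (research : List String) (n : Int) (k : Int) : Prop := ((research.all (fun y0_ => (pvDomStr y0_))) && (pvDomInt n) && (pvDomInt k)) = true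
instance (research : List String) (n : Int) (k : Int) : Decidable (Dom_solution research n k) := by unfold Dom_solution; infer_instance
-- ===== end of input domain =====

-- B replaces A's scan over (day,char) keys (with its inner re-walk of every window) by
-- per-character day-count tables, prefix sums and a back-to-front run-length table of
-- qualifying days, deciding each window start from those tables (objective: alternative);
-- on n = 0 (see D_) B intentionally returns "None" where A's count==n gate accidentally fires.

-- ===== PORT A =====
-- A's inner 'for i in range(1, n): … else: break' loop, over the remaining range list
def solInner (keys : List (Int × Char)) (keywords : PySem.Dict (Int × Char) Int)
    (day : Int) (char : Char) (k : Int) : List Int → Int × Int → Int × Int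
  | [], st => st
  | i :: rest, (count, total) =>
      let nextKey := (day + i, char)
      if keys.contains nextKey && decide (keywords.getD nextKey 0 ≥ k) then
        solInner keys keywords day char k rest (count + 1, total + keywords.getD nextKey 0)
      else
        (count, total)

-- A's per-key test: num/day/char bindings, the gate, the inner loop, then the final check
def solCond (keys : List (Int × Char)) (keywords : PySem.Dict (Int × Char) Int)
    (n k n_list : Int) (key : Int × Char) : Bool :=
  let num := keywords.getD key 0
  let day := key.1
  let char := key.2
  let ct :=
    if decide (num ≥ k) && decide (day + n ≤ n_list + 1) then
      solInner keys keywords day char k (PySem.List.pyRange 1 n 1) (0 + 1, 0 + num)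
    else (0, 0)
  ct.1 == n && decide (ct.2 ≥ 2 * n * k)

-- A's final 'for value in lists: if best_keyword[value] == maximum: return value'
-- (the fall-through, Python's implicit None, is unreachable there; rendered as "None")
def solFind (best : PySem.Dict Char Int) (maximum : Int) : List Char → String
  | [] => "None"
  | c :: rest => if best.getD c 0 == maximum then String.ofList [c] else solFind best maximum rest

def solution (research : List String) (n : Int) (k : Int) : String :=
  let n_list : Int := PySem.List.len research
  let keywords : PySem.Dict (Int × Char) Int :=
    (research.foldl
      (fun (st : Int × PySem.Dict (Int × Char) Int) value =>
        let date := st.1 + 1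
        (date,
          (PySem.List.pyRange 0 (PySem.Str.len value) 1).foldl
            (fun d i => d.modify (date, PySem.List.pyGetD value.toList i ' ') 0 (· + 1)) st.2))
      (0, PySem.Dict.empty)).2
  let keys := keywords.keys
  let best_keyword : PySem.Dict Char Int :=
    keys.foldl
      (fun best key =>
        if solCond keys keywords n k n_list key then best.modify key.2 0 (· + 1) else best)
      PySem.Dict.empty
  if best_keyword.size == 0 then "None"
  else
    match PySem.List.max? best_keyword.values id with
    | none => "None"   -- unreachable: best_keyword is nonempty here
    | some maximum => solFind best_keyword maximum (PySem.List.sorted best_keyword.keys id)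

-- ===== PORT B =====
-- B's per-char tally: the prefix-sum dict 'pre', the back-to-front run-length dict 'run',
-- then the loop deciding each window start from the two tables
def altTally (cnt : PySem.Dict Int Int) (m n k : Int) : Int :=
  let pre : PySem.Dict Int Int :=
    (PySem.List.pyRange 1 (m + 1) 1).foldl
      (fun pre d => pre.insert d (pre.getD (d - 1) 0 + cnt.getD d 0))
      (PySem.Dict.mk [(0, 0)])
  let run : PySem.Dict Int Int :=
    (PySem.List.pyRange m 0 (-1)).foldl
      (fun run d => run.insert d
        (if cnt.contains d && decide (cnt.getD d 0 ≥ k) then run.getD (d + 1) 0 + 1 else 0))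
      (PySem.Dict.mk [(m + 1, 0)])
  (PySem.List.pyRange 1 (m - n + 2) 1).foldl
    (fun t d =>
      if decide (run.getD d 0 ≥ n)
          && decide (pre.getD (d + n - 1) 0 - pre.getD (d - 1) 0 ≥ 2 * n * k)
      then t + 1 else t)
    0

-- B's final 'for c in best: if best[c] == top: return c' (fall-through unreachable, rendered "None")
def altFind (best : PySem.Dict Char Int) (top : Int) : List Char → String
  | [] => "None"
  | c :: rest => if best.getD c 0 == top then String.ofList [c] else altFind best top rest

def solution_alt (research : List String) (n : Int) (k : Int) : String :=
  let m : Int := PySem.List.len research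
  let perChar : PySem.Dict Char (PySem.Dict Int Int) :=
    (PySem.List.enumerate research 1).foldl
      (fun pc p =>
        p.2.toList.foldl
          (fun pc c =>
            let cnt := pc.getD c PySem.Dict.empty
            pc.insert c (cnt.modify p.1 0 (· + 1)))
          pc)
      PySem.Dict.empty
  if n < 1 then "None"
  else
    let best : PySem.Dict Char Int :=
      (PySem.List.sorted perChar.keys id).foldl
        (fun best c =>
          let t : Int := altTally (perChar.getD c PySem.Dict.empty) m n k
          if t != 0 then best.insert c t else best)
        PySem.Dict.empty
    if best.size == 0 then "None"
    else
      match PySem.List.max? best.values id with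
      | none => "None"   -- unreachable: best is nonempty here
      | some top => altFind best top best.keys

-- ===== PRECONDITION & SPEC =====
-- On n = 0 inputs where some character occurs fewer than k times on some day, A's
-- 'count == n' gate fires vacuously and A returns the character with the most such
-- sub-threshold days, while B returns "None" — the intended answer, since there are no
-- length-0 runs of qualifying consecutive days.
def D_solution (research : List String) (n : Int) (k : Int) : Prop :=
  n = 0 ∧ ∃ s ∈ research, ∃ c ∈ s.toList, (s.toList.count c : Int) < k
instance (research : List String) (n : Int) (k : Int) : Decidable (D_solution research n k) := by
  unfold D_solution; infer_instance

def Spec_solution (research : List String) (n : Int) (k : Int) (out : String) : Prop :=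
  ¬ D_solution research n k → out = solution_alt research n k
instance (research : List String) (n : Int) (k : Int) (out : String) : Decidable (Spec_solution research n k out) := by
  unfold Spec_solution; infer_instance

def pvDiffWitness_solution : List String × Int × Int := (["a"], 0, 2)
def pvDiffWitnessOut_solution : String × String := ("a", "None")

-- ===== CLAIM (what is proved, stated in full; the proofs are below) =====
def Claim_unchanged_solution : Prop := ∀ (research : List String) (n : Int) (k : Int), Dom_solution research n k → Spec_solution research n k (solution research n k)
def Claim_changed_solution : Prop := Dom_solution (pvDiffWitness_solution.1) (pvDiffWitness_solution.2.1) (pvDiffWitness_solution.2.2) ∧ D_solution (pvDiffWitness_solution.1) (pvDiffWitness_solution.2.1) (pvDiffWitness_solution.2.2) ∧ solution (pvDiffWitness_solution.1) (pvDiffWitness_solution.2.1) (pvDiffWitness_solution.2.2) = pvDiffWitnessOut_solution.1 ∧ solution_alt (pvDiffWitness_solution.1) (pvDiffWitness_solution.2.1) (pvDiffWitness_solution.2.2) = pvDiffWitnessOut_solution.2 ∧ pvDiffWitnessOut_solution.1 ≠ pvDiffWitnessOut_solution.2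
def Claim_exact_solution : Prop := ∀ (research : List String) (n : Int) (k : Int), Dom_solution research n k → D_solution research n k → solution research n k ≠ solution_alt research n k

-- ===== LEMMAS AND PROOFS =====

-- the (day, char) occurrence list, outer day order, inner string order (start day s)
def pvOccsF (rs : List String) (s : Int) : List (Int × Char) :=
  (PySem.List.enumerate rs s).flatMap (fun p => p.2.toList.map (fun c => (p.1, c)))

def pvOccs (research : List String) : List (Int × Char) := pvOccsF research 1

-- occurrence count of char c on day d
def pvC (research : List String) (d : Int) (c : Char) : Nat := (pvOccs research).count (d, c)

-- the window test both programs decide for a start day d and char c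
def pvQb (research : List String) (n k : Int) (d : Int) (c : Char) : Bool :=
  ((PySem.List.pyRange 0 n 1).all
      (fun i => decide ((d + i, c) ∈ pvOccs research) && decide ((pvC research (d + i) c : Int) ≥ k)))
    && decide (((PySem.List.pyRange 0 n 1).map (fun i => (pvC research (d + i) c : Int))).sum ≥ 2 * n * k)

-- A's per-key test, phrased over the counter of the occurrence list
def pvCondA (research : List String) (n k : Int) (p : Int × Char) : Bool :=
  solCond (PySem.Dict.counter (pvOccs research)).keys (PySem.Dict.counter (pvOccs research))
    n k (PySem.List.len research) p

-- chars of A's qualifying keys, in key order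
def pvQC (research : List String) (n k : Int) : List Char :=
  ((PySem.Set.ofList (pvOccs research)).filter (pvCondA research n k)).map (·.2)

-- B's per-char window tally
def pvTB (research : List String) (n k : Int) (c : Char) : Int :=
  ((PySem.List.pyRange 1 ((research.length : Int) - n + 2) 1).countP
    (fun d => pvQb research n k d c) : Nat)

-- B's key list: sorted distinct chars with positive tally
def pvLB (research : List String) (n k : Int) : List Char :=
  (PySem.List.sorted (PySem.Set.ofList ((pvOccs research).map (·.2))) id).filter
    (fun c => pvTB research n k c != 0)

theorem pvOccsF_day (rs : List String) (s : Int) :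
    ∀ p ∈ pvOccsF rs s, s ≤ p.1 ∧ p.1 < s + rs.length := by
  intro p hp
  simp only [pvOccsF, List.mem_flatMap] at hp
  obtain ⟨q, hq, hp⟩ := hp
  simp only [List.mem_map] at hp
  obtain ⟨c, _, rfl⟩ := hp
  obtain ⟨j, hj, rfl⟩ := (PySem.List.mem_enumerate_iff rs s q).1 hq
  simp; omega
theorem pvOccsF_cons (x : String) (rs : List String) (s : Int) :
    pvOccsF (x :: rs) s = x.toList.map (fun c => (s, c)) ++ pvOccsF rs (s + 1) := by
  simp [pvOccsF, PySem.List.enumerate_cons]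

theorem pvOccsF_count (rs : List String) (s : Int) (j : Nat) (hj : j < rs.length) (c : Char) :
    (pvOccsF rs s).count ((s + j : Int), c) = (rs.getD j "").toList.count c := by
  induction rs generalizing s j with
  | nil => simp at hj
  | cons x rs ih =>
    rw [pvOccsF_cons, List.count_append]
    cases j with
    | zero =>
      have h2 : (pvOccsF rs (s + 1)).count ((s + (0:Nat) : Int), c) = 0 := by
        rw [List.count_eq_zero]
        intro hm
        have := pvOccsF_day rs (s+1) _ hm
        simp at this
      rw [h2]
      have h3 : (x.toList.map (fun c => ((s : Int), c))).count ((s + (0:Nat) : Int), c)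
          = x.toList.count c := by
        rw [List.count_eq_countP, List.countP_map, List.count_eq_countP]
        apply List.countP_congr
        intro a _
        simp [Prod.ext_iff]
      rw [h3]; simp
    | succ j =>
      have h1 : (x.toList.map (fun c => (s, c))).count ((s + (j+1:Nat) : Int), c) = 0 := by
        rw [List.count_eq_zero]
        intro hm
        simp only [List.mem_map] at hm
        obtain ⟨a, _, ha⟩ := hm
        have := congrArg Prod.fst ha
        simp at this; omega
      rw [h1]
      have := ih (s+1) j (by simpa using hj)
      have he : ((s + 1 + j : Int), c) = ((s + (j+1:Nat) : Int), c) := by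
        push_cast; ring_nf
      rw [he] at this
      rw [this]
      simp
theorem pvOccs_elim (research : List String) (d : Int) (c : Char)
    (hp : (d, c) ∈ pvOccs research) :
    ∃ j : Nat, ∃ _ : j < research.length, d = 1 + (j : Int) ∧ c ∈ (research.getD j "").toList ∧
      pvC research d c = (research.getD j "").toList.count c := by
  have hb := pvOccsF_day research 1 _ hp
  simp only at hb
  obtain ⟨h1, h2⟩ := hb
  have hj : (d - 1).toNat < research.length := by omega
  refine ⟨(d - 1).toNat, hj, by omega, ?_, ?_⟩
  · have hcount : 0 < (pvOccs research).count (d, c) := List.count_pos_iff.2 hp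
    have := pvOccsF_count research 1 (d - 1).toNat hj c
    have he : ((1 + ((d-1).toNat : Int) : Int)) = d := by omega
    rw [he] at this
    rw [pvOccs] at hcount
    rw [this] at hcount
    exact List.count_pos_iff.1 hcount
  · have := pvOccsF_count research 1 (d - 1).toNat hj c
    have he : ((1 + ((d-1).toNat : Int) : Int)) = d := by omega
    rw [he] at this
    simpa [pvC, pvOccs] using this
theorem pvOccs_intro (research : List String) (j : Nat) (hj : j < research.length) (c : Char)
    (hc : c ∈ (research.getD j "").toList) :
    ((1 + j : Int), c) ∈ pvOccs research ∧
      pvC research (1 + (j : Int)) c = (research.getD j "").toList.count c := by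
  have h := pvOccsF_count research 1 j hj c
  constructor
  · rw [← List.count_pos_iff, pvOccs, h]
    exact List.count_pos_iff.2 hc
  · simpa [pvC, pvOccs] using h
theorem pvPhase1 (rs : List String) (date : Int) (d : PySem.Dict (Int × Char) Int) :
    (rs.foldl
      (fun (st : Int × PySem.Dict (Int × Char) Int) value =>
        let date := st.1 + 1
        (date,
          (PySem.List.pyRange 0 (PySem.Str.len value) 1).foldl
            (fun d i => d.modify (date, PySem.List.pyGetD value.toList i ' ') 0 (· + 1)) st.2))
      (date, d)).2
    = (pvOccsF rs (date + 1)).foldl (fun d x => d.modify x 0 (· + 1)) d := by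
  induction rs generalizing date d with
  | nil => simp [pvOccsF, PySem.List.enumerate_nil]
  | cons x rs ih =>
    rw [List.foldl_cons, pvOccsF_cons, List.foldl_append]
    have hinner :
        (PySem.List.pyRange 0 (PySem.Str.len x) 1).foldl
            (fun dd i => dd.modify (date + 1, PySem.List.pyGetD x.toList i ' ') 0 (· + 1)) d
          = (x.toList.map (fun c => ((date + 1 : Int), c))).foldl
              (fun dd y => dd.modify y 0 (· + 1)) d := by
      rw [PySem.Str.len_eq, List.foldl_map]
      exact PySem.List.foldl_pyRange_zero_pyGetD' x.toList ' '
        (fun dd c => dd.modify ((date + 1 : Int), c) 0 (· + 1)) d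
    have := ih (date + 1)
      ((x.toList.map (fun c => ((date + 1 : Int), c))).foldl (fun dd y => dd.modify y 0 (· + 1)) d)
    simp only [hinner]
    exact this

theorem pvBest_eq (research : List String) (n k : Int) :
    ((PySem.Dict.counter (pvOccs research)).keys).foldl
      (fun best key =>
        if solCond (PySem.Dict.counter (pvOccs research)).keys (PySem.Dict.counter (pvOccs research))
            n k (PySem.List.len research) key
        then best.modify key.2 0 (· + 1) else best)
      PySem.Dict.empty
    = PySem.Dict.counter (pvQC research n k) := by
  rw [PySem.List.foldl_if_eq_foldl_filter]
  rw [PySem.Dict.counter_eq_foldl (pvQC research n k)]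
  rw [pvQC, ← List.foldl_map (f := Prod.snd)
    (g := fun (best : PySem.Dict Char Int) c => best.modify c 0 (· + 1)), ← PySem.Dict.keys_counter]
  rfl

-- A's result, in terms of pvQC
theorem pvSolution_eq (research : List String) (n k : Int) :
    solution research n k =
      (if (PySem.Dict.counter (pvQC research n k)).size == 0 then "None"
       else
        match PySem.List.max? (PySem.Dict.counter (pvQC research n k)).values id with
        | none => "None"
        | some maximum =>
            solFind (PySem.Dict.counter (pvQC research n k)) maximum
              (PySem.List.sorted (PySem.Dict.counter (pvQC research n k)).keys id)) := by
  have hph := pvPhase1 research 0 PySem.Dict.empty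
  simp only [solution]
  rw [hph, ← PySem.Dict.counter_eq_foldl]
  have h01 : pvOccsF research (0 + 1) = pvOccs research := by norm_num [pvOccs]
  rw [h01]
  rw [pvBest_eq research n k]

-- phase 1 of B: the per-char dicts hold the per-day counts
def pvStepB (pc : PySem.Dict Char (PySem.Dict Int Int)) (x : Int × Char) :
    PySem.Dict Char (PySem.Dict Int Int) :=
  pc.insert x.2 ((pc.getD x.2 PySem.Dict.empty).modify x.1 0 (· + 1))

theorem pvPerChar_eq (research : List String) :
    (PySem.List.enumerate research 1).foldl
      (fun pc p =>
        p.2.toList.foldl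
          (fun pc c =>
            let cnt := pc.getD c PySem.Dict.empty
            pc.insert c (cnt.modify p.1 0 (· + 1)))
          pc)
      PySem.Dict.empty
    = (pvOccs research).foldl pvStepB PySem.Dict.empty := by
  rw [pvOccs, pvOccsF, List.foldl_flatMap]
  apply PySem.List.foldl_congr_mem
  intro pc p _
  rw [List.foldl_map]
  rfl

theorem pvStepB_getD (l : List (Int × Char)) (pc : PySem.Dict Char (PySem.Dict Int Int)) (c : Char) :
    (l.foldl pvStepB pc).getD c PySem.Dict.empty
    = ((l.filter (fun p => p.2 == c)).map (·.1)).foldl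
        (fun cnt day => cnt.modify day 0 (· + 1)) (pc.getD c PySem.Dict.empty) := by
  induction l generalizing pc with
  | nil => simp
  | cons p l ih =>
    rw [List.foldl_cons, ih]
    by_cases hc : p.2 = c
    · subst hc
      rw [List.filter_cons_of_pos (by simp), List.map_cons, List.foldl_cons]
      simp only [pvStepB]
      rw [PySem.Dict.getD_insert_self]
    · rw [List.filter_cons_of_neg (by simpa using hc)]
      simp only [pvStepB]
      rw [PySem.Dict.getD_insert_of_ne]
      exact fun h => hc h.symm

theorem pvDays_count (research : List String) (c : Char) (d : Int) :
    (((pvOccs research).filter (fun p => p.2 == c)).map (·.1)).count d = pvC research d c := by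
  rw [pvC, List.count_eq_countP, List.countP_map, List.count_eq_countP, List.countP_filter]
  apply List.countP_congr
  intro p _
  simp [Prod.ext_iff, Function.comp, and_comm]

theorem pvDays_mem (research : List String) (c : Char) (d : Int) :
    (d ∈ ((pvOccs research).filter (fun p => p.2 == c)).map (·.1)) ↔ (d, c) ∈ pvOccs research := by
  constructor
  · intro h
    obtain ⟨p, hp, rfl⟩ := List.mem_map.1 h
    have := (List.mem_filter.1 hp)
    have h2 : p.2 = c := by simpa using this.2
    have : (p.1, p.2) = p := rfl
    rw [← h2, this]
    exact (List.mem_filter.1 hp).1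
  · intro h
    exact List.mem_map.2 ⟨(d, c), List.mem_filter.2 ⟨h, by simp⟩, rfl⟩

theorem pvPerChar_keys (research : List String) :
    ((pvOccs research).foldl pvStepB PySem.Dict.empty).keys
      = PySem.Set.ofList ((pvOccs research).map (·.2)) := by
  rw [show pvStepB = (fun pc x => pc.insert ((·.2) x)
      ((fun (pc : PySem.Dict Char (PySem.Dict Int Int)) (x : Int × Char) =>
        (pc.getD x.2 PySem.Dict.empty).modify x.1 0 (· + 1)) pc x)) from rfl]
  rw [PySem.Dict.keys_foldl_insert_key (pvOccs research) (·.2)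
    (fun pc x => (pc.getD x.2 PySem.Dict.empty).modify x.1 0 (· + 1)) PySem.Dict.empty]
  rw [PySem.Dict.keys_empty, PySem.Set.update_nil_left]

-- per-day qualification, prefix sum and run length, over a general count dict
def pvQual (cnt : PySem.Dict Int Int) (k d : Int) : Bool :=
  cnt.contains d && decide (cnt.getD d 0 ≥ k)

def pvS (cnt : PySem.Dict Int Int) (d : Int) : Int :=
  ((PySem.List.pyRange 1 (d + 1) 1).map (fun e => cnt.getD e 0)).sum

def pvRlen (cnt : PySem.Dict Int Int) (k : Int) : Nat → Int → Int
  | 0, _ => 0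
  | j+1, d => if pvQual cnt k d then pvRlen cnt k j (d + 1) + 1 else 0

-- B's 'pre' dict holds the prefix sums
theorem pvPre_getD (cnt : PySem.Dict Int Int) (b : Int) :
    ∀ d : Int, 0 ≤ d → d < b →
      (((PySem.List.pyRange 1 b 1).foldl
          (fun pre d => pre.insert d (pre.getD (d - 1) 0 + cnt.getD d 0))
          (PySem.Dict.mk [(0, 0)])).getD d 0) = pvS cnt d := by
  have hbase : ∀ b' : Int, b' ≤ 1 → ∀ d : Int, 0 ≤ d → d < b' →
      (((PySem.List.pyRange 1 b' 1).foldl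
          (fun pre d => pre.insert d (pre.getD (d - 1) 0 + cnt.getD d 0))
          (PySem.Dict.mk [(0, 0)])).getD d 0) = pvS cnt d := by
    intro b' hb' d h0 h1
    have hd0 : d = 0 := by omega
    subst hd0
    rw [PySem.List.pyRange_one_eq_nil hb', List.foldl_nil,
        pvS, PySem.List.pyRange_one_eq_nil (by omega : (0:Int) + 1 ≤ 1)]
    rfl
  by_cases hb : b ≤ 1
  · exact hbase b hb
  · have hb1 : (1:Int) ≤ b := by omega
    clear hb
    induction b, hb1 using Int.le_induction with
    | base => exact hbase 1 le_rfl
    | succ b hb ihb =>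
      have ih : ∀ d : Int, 0 ≤ d → d < b →
          (((PySem.List.pyRange 1 b 1).foldl
              (fun pre d => pre.insert d (pre.getD (d - 1) 0 + cnt.getD d 0))
              (PySem.Dict.mk [(0, 0)])).getD d 0) = pvS cnt d := by
        by_cases hb1' : b ≤ 1
        · exact hbase b hb1'
        · exact ihb
      intro d h0 h1
      rw [PySem.List.pyRange_one_succ_right hb, List.foldl_append, List.foldl_cons, List.foldl_nil]
      by_cases hd : d = b
      · subst hd
        rw [PySem.Dict.getD_insert_self]
        by_cases hdd : d = 1
        · subst hdd
          have hb0 : (((PySem.List.pyRange 1 1 1).foldl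
              (fun pre d => pre.insert d (pre.getD (d - 1) 0 + cnt.getD d 0))
              (PySem.Dict.mk [(0, 0)])).getD (1 - 1) 0) = 0 := by
            rw [PySem.List.pyRange_one_eq_nil (le_refl 1), List.foldl_nil]; rfl
          rw [hb0, pvS, PySem.List.pyRange_one_succ_right (le_refl 1),
              PySem.List.pyRange_one_eq_nil (le_refl 1)]
          simp
        · rw [ih (d - 1) (by omega) (by omega)]
          rw [pvS, pvS, show d - 1 + 1 = d from by omega,
              PySem.List.pyRange_one_succ_right (by omega : (1:Int) ≤ d),
              List.map_append, List.sum_append]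
          simp
      · rw [PySem.Dict.getD_insert_of_ne _ _ _ hd]
        exact ih d h0 (by omega)

-- B's 'run' dict holds the run lengths (invariant of the countdown loop)
theorem pvRun_getD (cnt : PySem.Dict Int Int) (k m : Int) (t : Nat) (a : Int)
    (ha : a = m - t) (ha0 : 0 ≤ a) :
    ∀ d : Int, a < d → d ≤ m + 1 →
      (((PySem.List.pyRange m a (-1)).foldl
          (fun run d => run.insert d
            (if cnt.contains d && decide (cnt.getD d 0 ≥ k) then run.getD (d + 1) 0 + 1 else 0))
          (PySem.Dict.mk [(m + 1, 0)])).getD d 0) = pvRlen cnt k (m + 1 - d).toNat d := by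
  induction t generalizing a with
  | zero =>
    intro d hd1 hd2
    have hdm : d = m + 1 := by omega
    subst hdm
    rw [show a = m from by omega, PySem.List.pyRange_neg_one_eq_nil (le_refl m), List.foldl_nil]
    rw [show (m + 1 - (m + 1)).toNat = 0 from by omega]
    simp [pvRlen, PySem.Dict.getD, PySem.Dict.get?_mk_cons]
  | succ t ih =>
    have ham : a + 1 ≤ m := by omega
    have hsplit : PySem.List.pyRange m a (-1) = PySem.List.pyRange m (a + 1) (-1) ++ [a + 1] := by
      rw [PySem.List.pyRange_neg_one_eq_reverse, PySem.List.pyRange_neg_one_eq_reverse]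
      rw [PySem.List.pyRange_one_cons (by omega : a + 1 < m + 1)]
      rw [List.reverse_cons]
    have ih' := ih (a + 1) (by omega) (by omega)
    intro d hd1 hd2
    rw [hsplit, List.foldl_append, List.foldl_cons, List.foldl_nil]
    rw [ih' (a + 1 + 1) (by omega) (by omega)]
    by_cases hd : d = a + 1
    · subst hd
      rw [PySem.Dict.getD_insert_self]
      rw [show (m + 1 - (a + 1)).toNat = t + 1 from by omega]
      rw [show (m + 1 - (a + 1 + 1)).toNat = t from by omega]
      simp only [pvRlen, pvQual]
      rfl
    · rw [PySem.Dict.getD_insert_of_ne _ _ _ hd]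
      exact ih' d (by omega) hd2

theorem pvRlen_nonneg (cnt : PySem.Dict Int Int) (k : Int) (j : Nat) (d : Int) :
    0 ≤ pvRlen cnt k j d := by
  induction j generalizing d with
  | zero => simp [pvRlen]
  | succ j ih =>
    simp only [pvRlen]
    split
    · have := ih (d + 1); omega
    · omega

-- run length ≥ n iff the whole window qualifies (window inside the fuel)
theorem pvRlen_ge (cnt : PySem.Dict Int Int) (k : Int) (j : Nat) (n d : Int)
    (hn0 : 0 ≤ n) (hnj : n ≤ j) :
    (pvRlen cnt k j d ≥ n) ↔ ∀ i ∈ PySem.List.pyRange 0 n 1, pvQual cnt k (d + i) = true := by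
  induction j generalizing n d with
  | zero =>
    have hn : n = 0 := by omega
    subst hn
    rw [PySem.List.pyRange_one_eq_nil (le_refl 0)]
    simp [pvRlen]
  | succ j ih =>
    by_cases hn : n = 0
    · subst hn
      rw [PySem.List.pyRange_one_eq_nil (le_refl 0)]
      simpa using pvRlen_nonneg cnt k (j + 1) d
    · have hn1 : (1:Int) ≤ n := by omega
      rw [PySem.List.pyRange_one_cons (by omega : (0:Int) < n)]
      simp only [pvRlen]
      cases hq : pvQual cnt k d with
      | false =>
        rw [if_neg (by simp)]
        constructor
        · intro h; omega
        · intro h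
          have h0 := h 0 (List.mem_cons_self)
          rw [add_zero, hq] at h0
          exact absurd h0 (by simp)
      | true =>
        rw [if_pos rfl]
        have ihs := ih (n - 1) (d + 1) (by omega) (by omega)
        constructor
        · intro h i hi
          rcases List.mem_cons.1 hi with rfl | hi'
          · rw [add_zero]; exact hq
          · have hi2 := PySem.List.mem_pyRange_one.1 hi'
            have := ihs.1 (by omega) (i - 1)
              (PySem.List.mem_pyRange_one.2 ⟨by omega, by omega⟩)
            rw [show d + 1 + (i - 1) = d + i from by omega] at this
            exact this
        · intro h
          have hge : pvRlen cnt k j (d + 1) ≥ n - 1 := by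
            apply ihs.2
            intro i hi
            have hi2 := PySem.List.mem_pyRange_one.1 hi
            have := h (i + 1) (List.mem_cons_of_mem _
              (PySem.List.mem_pyRange_one.2 ⟨by omega, by omega⟩))
            rw [show d + (i + 1) = d + 1 + i from by omega] at this
            exact this
          omega

-- the prefix-sum difference is the window sum
theorem pvPre_window (cnt : PySem.Dict Int Int) (d n : Int) (hd : 1 ≤ d) (hn : 0 ≤ n) :
    pvS cnt (d + n - 1) - pvS cnt (d - 1)
      = ((PySem.List.pyRange 0 n 1).map (fun i => cnt.getD (d + i) 0)).sum := by
  rw [pvS, pvS, show d - 1 + 1 = d from by omega, show d + n - 1 + 1 = d + n from by omega]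
  rw [PySem.List.pyRange_one_append 1 d (d + n) hd (by omega), List.map_append, List.sum_append,
      add_sub_cancel_left]
  rw [PySem.List.pyRange_one d (d + n), PySem.List.pyRange_one 0 n,
      show (d + n - d).toNat = (n - 0).toNat from by omega, List.map_map, List.map_map]
  apply congrArg
  apply List.map_congr_left
  intro x hx
  simp

-- B's two-table window test equals the window predicate both sides decide
theorem pvWindowIff (cnt : PySem.Dict Int Int) (k M n d : Int) (hM : 0 ≤ M) (hn : 1 ≤ n)
    (hd1 : 1 ≤ d) (hd2 : d < M - n + 2) :
    (decide ((((PySem.List.pyRange M 0 (-1)).foldl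
          (fun run d => run.insert d
            (if cnt.contains d && decide (cnt.getD d 0 ≥ k) then run.getD (d + 1) 0 + 1 else 0))
          (PySem.Dict.mk [(M + 1, 0)])).getD d 0) ≥ n)
      && decide ((((PySem.List.pyRange 1 (M + 1) 1).foldl
          (fun pre d => pre.insert d (pre.getD (d - 1) 0 + cnt.getD d 0))
          (PySem.Dict.mk [(0, 0)])).getD (d + n - 1) 0)
          - (((PySem.List.pyRange 1 (M + 1) 1).foldl
          (fun pre d => pre.insert d (pre.getD (d - 1) 0 + cnt.getD d 0))
          (PySem.Dict.mk [(0, 0)])).getD (d - 1) 0) ≥ 2 * n * k))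
    = (((PySem.List.pyRange 0 n 1).all (fun i => pvQual cnt k (d + i)))
      && decide (((PySem.List.pyRange 0 n 1).map (fun i => cnt.getD (d + i) 0)).sum ≥ 2 * n * k)) := by
  rw [pvRun_getD cnt k M M.toNat 0 (by omega) le_rfl d (by omega) (by omega),
      pvPre_getD cnt (M + 1) (d + n - 1) (by omega) (by omega),
      pvPre_getD cnt (M + 1) (d - 1) (by omega) (by omega),
      pvPre_window cnt d n hd1 (by omega)]
  congr 1
  by_cases hall : ∀ i ∈ PySem.List.pyRange 0 n 1, pvQual cnt k (d + i) = true
  · rw [decide_eq_true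
      ((pvRlen_ge cnt k (M + 1 - d).toNat n d (by omega) (by omega)).mpr hall)]
    exact (List.all_eq_true.mpr hall).symm
  · rw [decide_eq_false (fun h =>
      hall ((pvRlen_ge cnt k (M + 1 - d).toNat n d (by omega) (by omega)).mp h))]
    exact ((Bool.eq_false_iff).2 (fun h => hall (List.all_eq_true.mp h))).symm

-- B's per-char tally equals the window count of pvQb
theorem pvAltTally (research : List String) (n k : Int) (hn : 1 ≤ n) (c : Char) :
    altTally (((pvOccs research).foldl pvStepB PySem.Dict.empty).getD c PySem.Dict.empty)
      (PySem.List.len research) n k = pvTB research n k c := by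
  rw [pvStepB_getD, PySem.Dict.getD_empty, ← PySem.Dict.counter_eq_foldl, PySem.List.len_eq]
  simp only [altTally]
  rw [PySem.List.foldl_if_add_one, pvTB, zero_add]
  congr 1
  apply List.countP_congr
  intro d hd
  obtain ⟨hd1, hd2⟩ := PySem.List.mem_pyRange_one.1 hd
  rw [pvWindowIff _ k (research.length : Int) n d (by positivity) hn hd1 hd2]
  rw [pvQb]
  simp only [pvQual, PySem.Dict.getD_counter, PySem.Dict.contains_counter, pvDays_count,
    List.contains_eq_mem]
  simp only [pvDays_mem]

-- B's result, in terms of pvLB / pvTB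
theorem pvSolutionAlt_eq (research : List String) (n k : Int) :
    solution_alt research n k =
      (if n < 1 then "None"
       else
        if (pvLB research n k).length == 0 then "None"
        else
          match PySem.List.max? ((pvLB research n k).map (pvTB research n k)) id with
          | none => "None"
          | some top =>
              altFind (PySem.Dict.mk ((pvLB research n k).map (fun c => (c, pvTB research n k c))))
                top (pvLB research n k)) := by
  simp only [solution_alt]
  rw [pvPerChar_eq]
  by_cases hn : n < 1
  · rw [if_pos hn, if_pos hn]
  · rw [if_neg hn, if_neg hn]
    have hn' : (1:Int) ≤ n := by omega
    simp only [pvAltTally research n k hn', pvPerChar_keys]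
    have hnd : (pvLB research n k).Nodup := by
      rw [pvLB]
      exact (((PySem.List.sorted_perm (PySem.Set.ofList ((pvOccs research).map (·.2))) id false).nodup_iff).2
        (PySem.Set.nodup_ofList _)).filter _
    have hB : List.foldl
        (fun best c => if (pvTB research n k c != 0) = true then best.insert c (pvTB research n k c) else best)
        PySem.Dict.empty
        (PySem.List.sorted (PySem.Set.ofList ((pvOccs research).map (fun x => x.2))) id)
        = PySem.Dict.mk ((pvLB research n k).map (fun c => (c, pvTB research n k c))) := by
      rw [PySem.List.foldl_if_eq_foldl_filter (p := fun c => pvTB research n k c != 0)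
        (f := fun (best : PySem.Dict Char Int) c => best.insert c (pvTB research n k c))]
      apply PySem.Dict.ext
      rw [show List.filter (fun c => pvTB research n k c != 0)
          (PySem.List.sorted (PySem.Set.ofList ((pvOccs research).map (fun x => x.2))) id)
        = pvLB research n k from rfl]
      rw [PySem.Dict.items_foldl_insert_fresh (pvLB research n k) (fun c => c) (pvTB research n k)
        PySem.Dict.empty (fun a _ => PySem.Dict.contains_empty a) (by simpa using hnd)]
      rfl
    rw [hB]
    simp only [PySem.Dict.size, PySem.Dict.values_mk, PySem.Dict.keys_mk, List.map_map,
      List.length_map, Function.comp_def, List.map_id']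

-- solInner characterization
theorem pvInner_all (keys : List (Int × Char)) (kw : PySem.Dict (Int × Char) Int)
    (day : Int) (c : Char) (k : Int) (l : List Int) (c0 t0 : Int)
    (h : ∀ i ∈ l, (keys.contains (day + i, c) && decide (kw.getD (day + i, c) 0 ≥ k)) = true) :
    solInner keys kw day c k l (c0, t0)
      = (c0 + l.length, t0 + (l.map (fun i => kw.getD (day + i, c) 0)).sum) := by
  induction l generalizing c0 t0 with
  | nil => simp [solInner]
  | cons i rest ih =>
    have hi := h i (by simp)
    simp only [solInner]
    rw [if_pos hi, ih _ _ (fun j hj => h j (by simp [hj]))]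
    simp only [Prod.mk.injEq, List.length_cons, List.map_cons, List.sum_cons]
    constructor <;> push_cast <;> ring
theorem pvInner_break (keys : List (Int × Char)) (kw : PySem.Dict (Int × Char) Int)
    (day : Int) (c : Char) (k : Int) (l : List Int) (c0 t0 : Int)
    (h : ¬ ∀ i ∈ l, (keys.contains (day + i, c) && decide (kw.getD (day + i, c) 0 ≥ k)) = true) :
    (solInner keys kw day c k l (c0, t0)).1 < c0 + l.length := by
  induction l generalizing c0 t0 with
  | nil => simp at h
  | cons i rest ih =>
    by_cases hi : (keys.contains (day + i, c) && decide (kw.getD (day + i, c) 0 ≥ k)) = true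
    · simp only [solInner]
      rw [if_pos hi]
      have : ¬ ∀ j ∈ rest, (keys.contains (day + j, c) && decide (kw.getD (day + j, c) 0 ≥ k)) = true := by
        intro hall; exact h (by intro j hj; rcases List.mem_cons.1 hj with rfl | hj; exact hi; exact hall j hj)
      have := ih (c0 + 1) (t0 + kw.getD (day + i, c) 0) this
      simp only [List.length_cons]; push_cast; omega
    · simp only [solInner]
      rw [if_neg hi]
      simp only [List.length_cons]
      have : (0:Int) ≤ rest.length := by positivity
      push_cast; omega
theorem pvCondA_neg (research : List String) (n k : Int) (p : Int × Char) (hn : n < 0) :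
    pvCondA research n k p = false := by
  simp only [pvCondA, solCond]
  rw [PySem.List.pyRange_one_eq_nil (by omega : n ≤ 1)]
  split
  · simp only [solInner]
    simp
    omega
  · simp
    omega

theorem pvCondA_zero (research : List String) (k : Int) (p : Int × Char)
    (hp : p ∈ pvOccs research) :
    (pvCondA research 0 k p = true) ↔ (pvC research p.1 p.2 : Int) < k := by
  have hd := pvOccsF_day research 1 p hp
  have hC0 : (PySem.Dict.counter (pvOccs research)).getD p 0 = ((pvC research p.1 p.2 : Int)) := by
    rw [pvC, Prod.mk.eta, PySem.Dict.getD_counter]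
  simp only [pvCondA, solCond, hC0]
  rw [PySem.List.pyRange_one_eq_nil (by omega : (0:Int) ≤ 1), PySem.List.len_eq]
  by_cases hk : ((pvC research p.1 p.2 : Int) ≥ k)
  · rw [if_pos (by simp [hk]; omega)]
    simp only [solInner]
    simp
    omega
  · rw [if_neg (by simp [hk])]
    simp
    omega

theorem pvCondA_pos (research : List String) (n k : Int) (p : Int × Char) (hn : 1 ≤ n)
    (hp : p ∈ pvOccs research) :
    (pvCondA research n k p = true)
      ↔ (p.1 + n ≤ (research.length : Int) + 1 ∧ pvQb research n k p.1 p.2 = true) := by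
  have hC0 : (PySem.Dict.counter (pvOccs research)).getD p 0 = ((pvC research p.1 p.2 : Int)) := by
    rw [pvC, Prod.mk.eta, PySem.Dict.getD_counter]
  have hCi : ∀ i : Int, (PySem.Dict.counter (pvOccs research)).getD (p.1 + i, p.2) 0
      = ((pvC research (p.1 + i) p.2 : Int)) := by
    intro i; rw [pvC, PySem.Dict.getD_counter]
  have hok : ∀ i : Int,
      ((PySem.Dict.counter (pvOccs research)).keys.contains (p.1 + i, p.2)
        && decide ((PySem.Dict.counter (pvOccs research)).getD (p.1 + i, p.2) 0 ≥ k))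
      = (decide ((p.1 + i, p.2) ∈ pvOccs research)
        && decide ((pvC research (p.1 + i) p.2 : Int) ≥ k)) := by
    intro i
    rw [PySem.Dict.keys_counter, List.contains_eq_mem, hCi]
    simp
  have hrange : PySem.List.pyRange 0 n 1 = 0 :: PySem.List.pyRange 1 n 1 := by
    rw [PySem.List.pyRange_one_cons (by omega : (0:Int) < n)]
    norm_num
  have hlen1 : ((PySem.List.pyRange 1 n 1).length : Int) = n - 1 := by
    rw [PySem.List.length_pyRange_one]; omega
  have hQb : pvQb research n k p.1 p.2
      = ((decide (p ∈ pvOccs research) && decide ((pvC research p.1 p.2 : Int) ≥ k))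
          && (PySem.List.pyRange 1 n 1).all
              (fun i => decide ((p.1 + i, p.2) ∈ pvOccs research)
                && decide ((pvC research (p.1 + i) p.2 : Int) ≥ k))
          && decide ((pvC research p.1 p.2 : Int)
              + ((PySem.List.pyRange 1 n 1).map (fun i => (pvC research (p.1 + i) p.2 : Int))).sum
              ≥ 2 * n * k)) := by
    rw [pvQb, hrange]
    simp only [List.all_cons, List.map_cons, List.sum_cons, add_zero, Prod.mk.eta]
  simp only [pvCondA, solCond, hC0, PySem.List.len_eq]
  by_cases hg1 : ((pvC research p.1 p.2 : Int) ≥ k)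
  · by_cases hg2 : (p.1 + n ≤ (research.length : Int) + 1)
    · rw [if_pos (by simp [hg1]; omega)]
      by_cases hall : ∀ i ∈ PySem.List.pyRange 1 n 1,
          ((PySem.Dict.counter (pvOccs research)).keys.contains (p.1 + i, p.2)
            && decide ((PySem.Dict.counter (pvOccs research)).getD (p.1 + i, p.2) 0 ≥ k)) = true
      · rw [pvInner_all _ _ _ _ _ _ _ _ hall]
        have hmap : (PySem.List.pyRange 1 n 1).map
              (fun i => (PySem.Dict.counter (pvOccs research)).getD (p.1 + i, p.2) 0)
            = (PySem.List.pyRange 1 n 1).map (fun i => (pvC research (p.1 + i) p.2 : Int)) :=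
          List.map_congr_left (fun i _ => hCi i)
        have hall' : ((PySem.List.pyRange 1 n 1).all
            (fun i => decide ((p.1 + i, p.2) ∈ pvOccs research)
              && decide ((pvC research (p.1 + i) p.2 : Int) ≥ k))) = true := by
          rw [List.all_eq_true]
          intro i hi
          rw [← hok i]
          exact hall i hi
        rw [hmap, hQb]
        simp only [Bool.and_eq_true, beq_iff_eq, decide_eq_true_eq, hall']
        constructor
        · rintro ⟨-, hsum⟩
          exact ⟨hg2, ⟨⟨hp, hg1⟩, trivial⟩, by omega⟩
        · rintro ⟨-, -, hsum⟩
          exact ⟨by omega, by omega⟩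
      · rw [hQb]
        have h1 := pvInner_break (PySem.Dict.counter (pvOccs research)).keys
          (PySem.Dict.counter (pvOccs research)) p.1 p.2 k (PySem.List.pyRange 1 n 1)
          (0 + 1) (0 + ((pvC research p.1 p.2 : Int))) hall
        have hallf : ((PySem.List.pyRange 1 n 1).all
            (fun i => decide ((p.1 + i, p.2) ∈ pvOccs research)
              && decide ((pvC research (p.1 + i) p.2 : Int) ≥ k))) = false := by
          rw [List.all_eq_false]
          push Not at hall
          obtain ⟨i, hi, hbad⟩ := hall
          exact ⟨i, hi, by rw [← hok i]; simpa using hbad⟩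
        simp only [hallf, Bool.and_false, Bool.false_and, Bool.and_eq_true, beq_iff_eq]
        constructor
        · rintro ⟨h1', -⟩
          omega
        · rintro ⟨-, h, -⟩
    · rw [if_neg (by simp; omega)]
      simp only [Bool.and_eq_true, beq_iff_eq]
      constructor
      · rintro ⟨h0, -⟩
        omega
      · rintro ⟨h, -⟩
        omega
  · rw [if_neg (by simp [hg1])]
    rw [hQb]
    have : (decide ((pvC research p.1 p.2 : Int) ≥ k)) = false := by simpa using hg1
    simp only [this, Bool.and_false, Bool.false_and, Bool.and_eq_true, beq_iff_eq]
    constructor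
    · rintro ⟨h0, -⟩
      omega
    · rintro ⟨-, h, -⟩

-- the central count equality, per char, for n ≥ 1
theorem pvTally (research : List String) (n k : Int) (hn : 1 ≤ n) (c : Char) :
    ((pvQC research n k).count c : Int) = pvTB research n k c := by
  have hm : ∀ q : Int × Char, q ∈ PySem.Set.ofList (pvOccs research) ↔ q ∈ pvOccs research :=
    fun q => PySem.Set.mem_ofList _ q
  have hkey : ∀ d : Int, ((d, c) ∈ pvOccs research ∧ pvCondA research n k (d, c) = true)
      ↔ (1 ≤ d ∧ d < (research.length : Int) - n + 2 ∧ pvQb research n k d c = true) := by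
    intro d
    constructor
    · rintro ⟨hin, hA⟩
      have hb := pvOccsF_day research 1 (d, c) hin
      have := (pvCondA_pos research n k (d, c) hn hin).1 hA
      exact ⟨by simpa using hb.1, by omega, this.2⟩
    · rintro ⟨h1, h2, hQ⟩
      have hin : (d, c) ∈ pvOccs research := by
        have h0n : (0 : Int) ∈ PySem.List.pyRange 0 n 1 := PySem.List.mem_pyRange_one.2 ⟨le_refl 0, by omega⟩
        have := hQ
        rw [pvQb, Bool.and_eq_true, List.all_eq_true] at this
        have h0 := this.1 0 h0n
        rw [Bool.and_eq_true, decide_eq_true_eq] at h0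
        simpa using h0.1
      refine ⟨hin, (pvCondA_pos research n k (d, c) hn hin).2 ⟨by omega, hQ⟩⟩
  have hperm : ((PySem.Set.ofList (pvOccs research)).filter
        (fun p => (pvCondA research n k p) && (p.2 == c))).Perm
      (((PySem.List.pyRange 1 ((research.length : Int) - n + 2) 1).filter
        (fun d => pvQb research n k d c)).map (fun d => (d, c))) := by
    rw [List.perm_ext_iff_of_nodup ((PySem.Set.nodup_ofList _).filter _)
      (((PySem.List.nodup_pyRange_one _ _).filter _).map
        (fun a b h => (Prod.ext_iff.1 h).1))]
    intro q
    obtain ⟨qd, qc⟩ := q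
    simp only [List.mem_filter, List.mem_map, hm, Bool.and_eq_true, beq_iff_eq,
      PySem.List.mem_pyRange_one]
    constructor
    · rintro ⟨hin, hA, rfl⟩
      obtain ⟨h1, h2, hQ⟩ := (hkey qd).1 ⟨hin, hA⟩
      exact ⟨qd, ⟨⟨h1, h2⟩, hQ⟩, rfl⟩
    · rintro ⟨d, ⟨⟨h1, h2⟩, hQ⟩, hdq⟩
      injection hdq with h3 h4
      subst h3; subst h4
      obtain ⟨hin, hA⟩ := (hkey d).2 ⟨h1, h2, hQ⟩
      exact ⟨hin, hA, rfl⟩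
  rw [pvQC, pvTB]
  rw [List.count_eq_countP, List.countP_map, List.countP_filter]
  rw [show (fun p : Int × Char => ((· == c) ∘ Prod.snd) p && pvCondA research n k p)
      = (fun p : Int × Char => (pvCondA research n k p) && (p.2 == c)) from by
    funext p; simp [Function.comp, Bool.and_comm]]
  rw [List.countP_eq_length_filter, List.countP_eq_length_filter]
  rw [hperm.length_eq, List.length_map]

-- A's sorted qualifying-char list is B's key list (n ≥ 1)
theorem pvKeys_eq (research : List String) (n k : Int) (hn : 1 ≤ n) :
    PySem.List.sorted (PySem.Set.ofList (pvQC research n k)) id = pvLB research n k := by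
  have hndS : (PySem.List.sorted (PySem.Set.ofList ((pvOccs research).map (·.2))) id).Nodup :=
    ((PySem.List.sorted_perm (PySem.Set.ofList ((pvOccs research).map (·.2))) id false).nodup_iff).2
      (PySem.Set.nodup_ofList _)
  have hndL : (pvLB research n k).Nodup := by
    rw [pvLB]; exact hndS.filter _
  apply PySem.List.sorted_eq_of_perm_of_pairwise_lt
  · rw [List.perm_ext_iff_of_nodup hndL (PySem.Set.nodup_ofList _)]
    intro c'
    rw [pvLB, List.mem_filter, PySem.List.mem_sorted, PySem.Set.mem_ofList,
      PySem.Set.mem_ofList]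
    constructor
    · rintro ⟨-, hne⟩
      rw [← List.count_pos_iff]
      have := pvTally research n k hn c'
      simp only [bne_iff_ne, ne_eq] at hne
      omega
    · intro hmem
      obtain ⟨p, hpf, rfl⟩ := List.mem_map.1 (by rw [pvQC] at hmem; exact hmem)
      have hpK := (List.mem_filter.1 hpf).1
      refine ⟨List.mem_map.2 ⟨p, (PySem.Set.mem_ofList _ _).1 hpK, rfl⟩, ?_⟩
      have hc := List.count_pos_iff.2 hmem
      have := pvTally research n k hn p.2
      simp only [bne_iff_ne, ne_eq]
      omega
  · have hlt : (PySem.List.sorted (PySem.Set.ofList ((pvOccs research).map (·.2))) id).Pairwise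
        (fun a b => id a < id b) := by
      have h1 := PySem.List.sorted_pairwise (PySem.Set.ofList ((pvOccs research).map (·.2))) id
      have h2 : (PySem.List.sorted (PySem.Set.ofList ((pvOccs research).map (·.2))) id).Pairwise
          (fun a b => a ≠ b) := hndS
      exact (h1.and h2).imp (fun h => lt_of_le_of_ne h.1 h.2)
    rw [pvLB]
    exact hlt.filter _

theorem pvMax?_eq_mathlib (xs : List Int) : PySem.List.max? xs id = xs.max? := by
  cases xs with
  | nil => rfl
  | cons x xs =>
    rw [List.max?_cons', PySem.List.max?, List.foldl_cons]
    change List.foldl _ (some x) xs = _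
    induction xs generalizing x with
    | nil => rfl
    | cons y ys ih =>
      rw [List.foldl_cons, List.foldl_cons]
      by_cases hxy : x ≤ y
      · change List.foldl _ (if id x < id y then some y else some x) ys = _
        rcases eq_or_lt_of_le hxy with rfl | hlt
        · rw [if_neg (by simp), max_self]
          exact ih x
        · rw [if_pos (by simpa using hlt), max_eq_right hxy]
          exact ih y
      · change List.foldl _ (if id x < id y then some y else some x) ys = _
        rw [if_neg (by simpa using not_lt.2 (le_of_not_ge hxy)), max_eq_left (le_of_not_ge hxy)]
        exact ih x

theorem pvMax?_perm (xs ys : List Int) (h : xs.Perm ys) :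
    PySem.List.max? xs id = PySem.List.max? ys id := by
  rw [pvMax?_eq_mathlib, pvMax?_eq_mathlib]
  cases hx : xs.max? with
  | none =>
    rw [List.max?_eq_none_iff] at hx
    subst hx
    have hy : ys = [] := List.perm_nil.1 h.symm
    subst hy; rfl
  | some m =>
    obtain ⟨hmem, hle⟩ := List.max?_eq_some_iff.1 hx
    symm
    exact List.max?_eq_some_iff.2 ⟨h.mem_iff.1 hmem, fun b hb => hle b (h.mem_iff.2 hb)⟩
theorem pvMax?_some (xs : List Int) (hne : xs ≠ []) : ∃ m, PySem.List.max? xs id = some m := by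
  rw [pvMax?_eq_mathlib]
  cases hx : xs.max? with
  | none => exact absurd (List.max?_eq_none_iff.1 hx) hne
  | some m => exact ⟨m, rfl⟩

theorem pvFind_ne_none (b : PySem.Dict Char Int) (M : Int) (l : List Char)
    (h : ∃ c ∈ l, b.getD c 0 = M) : solFind b M l ≠ "None" := by
  induction l with
  | nil => simp at h
  | cons c rest ih =>
    obtain ⟨c', hc', hM⟩ := h
    simp only [solFind]
    by_cases hb : (b.getD c 0 == M) = true
    · rw [if_pos hb]
      intro he
      have := congrArg String.toList he
      simp at this
    · rw [if_neg hb]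
      apply ih
      rcases List.mem_cons.1 hc' with rfl | hc'
      · exact absurd (by simp [hM]) hb
      · exact ⟨c', hc', hM⟩

theorem pvFind_eq (b b' : PySem.Dict Char Int) (M : Int) (l : List Char)
    (h : ∀ c ∈ l, b.getD c 0 = b'.getD c 0) :
    solFind b M l = altFind b' M l := by
  induction l with
  | nil => rfl
  | cons c rest ih =>
    simp only [solFind, altFind, h c (by simp)]
    split <;> [rfl; exact ih (fun c hc => h c (by simp [hc]))]
-- ===== VERDICT (by name: the statement is the Claim_ definition above) =====
theorem solution_spec : Claim_unchanged_solution := by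
  intro research n k _ hD
  rw [pvSolution_eq, pvSolutionAlt_eq]
  by_cases hn1 : n < 1
  · rw [if_pos hn1]
    have hQCnil : pvQC research n k = [] := by
      rw [pvQC]
      rw [List.filter_eq_nil_iff.2 ?_, List.map_nil]
      intro p hp
      have hpo := (PySem.Set.mem_ofList (pvOccs research) p).1 hp
      rcases lt_or_ge n 0 with hneg | hge
      · simp [pvCondA_neg research n k p hneg]
      · have hn0 : n = 0 := by omega
        subst hn0
        cases hA : pvCondA research 0 k p with
        | false => simp
        | true =>
          exfalso
          have hlt := (pvCondA_zero research k p hpo).1 hA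
          obtain ⟨j, hj, hd, hcmem, hcount⟩ := pvOccs_elim research p.1 p.2 hpo
          exact hD ⟨rfl, research.getD j "", by
              rw [List.getD_eq_getElem?_getD, List.getElem?_eq_getElem hj]
              exact List.getElem_mem hj,
            p.2, hcmem, by rw [← hcount]; exact hlt⟩
    rw [hQCnil]
    rw [if_pos (by rfl)]
  · rw [if_neg hn1]
    have hn' : (1:Int) ≤ n := by omega
    have hK := pvKeys_eq research n k hn'
    have hsizeA : (PySem.Dict.counter (pvQC research n k)).size
        = (PySem.Set.ofList (pvQC research n k)).length := by
      simp only [PySem.Dict.size, PySem.Dict.items_counter, List.length_map]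
    have hlen : (pvLB research n k).length = (PySem.Set.ofList (pvQC research n k)).length := by
      rw [← hK, PySem.List.length_sorted]
    by_cases hempty : (PySem.Set.ofList (pvQC research n k)).length = 0
    · rw [if_pos (by simp [hsizeA, hempty]), if_pos (by simp [hlen, hempty])]
    · rw [if_neg (by simp [hsizeA, hempty]), if_neg (by simp [hlen, hempty])]
      have hperm : (pvLB research n k).Perm (PySem.Set.ofList (pvQC research n k)) := by
        have := PySem.List.sorted_perm (PySem.Set.ofList (pvQC research n k)) id false
        rwa [hK] at this
      have hvalA : (PySem.Dict.counter (pvQC research n k)).values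
          = (PySem.Set.ofList (pvQC research n k)).map
              (fun c => ((pvQC research n k).count c : Int)) := by
        simp only [PySem.Dict.values, PySem.Dict.items_counter, List.map_map, Function.comp_def]
      have hmax : PySem.List.max? (PySem.Dict.counter (pvQC research n k)).values id
          = PySem.List.max? ((pvLB research n k).map (pvTB research n k)) id := by
        rw [hvalA,
          List.map_congr_left (fun c _ => pvTally research n k hn' c)]
        exact pvMax?_perm _ _ ((hperm.map _).symm)
      rw [← hmax]
      cases hM : PySem.List.max? (PySem.Dict.counter (pvQC research n k)).values id with
      | none => rfl
      | some M =>
        rw [PySem.Dict.keys_counter, hK]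
        have hndL : (pvLB research n k).Nodup := by
          have := PySem.List.sorted_perm (PySem.Set.ofList (pvQC research n k)) id false
          rw [hK] at this
          exact (this.nodup_iff).2 (PySem.Set.nodup_ofList _)
        apply pvFind_eq
        intro c hc
        rw [PySem.Dict.getD_counter, pvTally research n k hn' c]
        have hitem : (c, pvTB research n k c)
            ∈ (PySem.Dict.mk ((pvLB research n k).map
                (fun c => (c, pvTB research n k c)))).items :=
          List.mem_map.2 ⟨c, hc, rfl⟩
        have hndk : (PySem.Dict.mk ((pvLB research n k).map
            (fun c => (c, pvTB research n k c)))).keys.Nodup := by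
          simp only [PySem.Dict.keys, List.map_map, Function.comp_def]
          simpa using hndL
        rw [PySem.Dict.getD_of_mem_items _ hitem hndk 0]

set_option maxRecDepth 8000 in
theorem pvChangedA : solution ["a"] 0 2 = "a" := by decide
set_option maxRecDepth 8000 in
theorem pvChangedB : solution_alt ["a"] 0 2 = "None" := by decide
set_option maxRecDepth 8000 in
theorem solution_changed : Claim_changed_solution := by
  unfold Claim_changed_solution
  exact ⟨by decide, show D_solution ["a"] 0 2 from ⟨rfl, "a", by simp, 'a', by simp, by simp⟩,
    pvChangedA, pvChangedB, by decide⟩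

theorem solution_tight : Claim_exact_solution := by
  intro research n k _ hD
  obtain ⟨hn0, s, hs, c, hcs, hck⟩ := hD
  subst hn0
  rw [pvSolution_eq, pvSolutionAlt_eq, if_pos (by norm_num : (0:Int) < 1)]
  obtain ⟨j, hj, hsj⟩ := List.mem_iff_getElem.1 hs
  have hgetD : research.getD j "" = s := by
    rw [List.getD_eq_getElem?_getD, List.getElem?_eq_getElem hj, hsj]; rfl
  have hintro := pvOccs_intro research j hj c (by rw [hgetD]; exact hcs)
  have hmemocc : ((1 + j : Int), c) ∈ pvOccs research := hintro.1
  have hcond : pvCondA research 0 k ((1 + j : Int), c) = true := by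
    rw [pvCondA_zero research k _ hmemocc]
    show (pvC research (1 + (j : Int)) c : Int) < k
    rw [hintro.2, hgetD]
    exact hck
  have hcQC : c ∈ pvQC research 0 k := by
    rw [pvQC]
    exact List.mem_map.2 ⟨_, List.mem_filter.2 ⟨(PySem.Set.mem_ofList _ _).2 hmemocc, hcond⟩, rfl⟩
  have hkeys : c ∈ (PySem.Dict.counter (pvQC research 0 k)).keys := by
    rw [PySem.Dict.keys_counter]
    exact (PySem.Set.mem_ofList _ _).2 hcQC
  have hitne : (PySem.Dict.counter (pvQC research 0 k)).items ≠ [] := by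
    intro h
    rw [PySem.Dict.keys, h] at hkeys
    simp at hkeys
  have hsize : ¬ (((PySem.Dict.counter (pvQC research 0 k)).size == 0) = true) := by
    simp only [beq_iff_eq, PySem.Dict.size]
    intro h
    exact hitne (List.length_eq_zero_iff.1 h)
  rw [if_neg hsize]
  have hvne : (PySem.Dict.counter (pvQC research 0 k)).values ≠ [] := by
    rw [PySem.Dict.values]
    intro h
    exact hitne (List.map_eq_nil_iff.1 h)
  obtain ⟨M, hM⟩ := pvMax?_some _ hvne
  rw [hM]
  have hMmem : M ∈ (PySem.Dict.counter (pvQC research 0 k)).values := by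
    rw [pvMax?_eq_mathlib] at hM
    exact (List.max?_eq_some_iff.1 hM).1
  rw [PySem.Dict.values] at hMmem
  obtain ⟨p, hp, hpM⟩ := List.mem_map.1 hMmem
  have hnd : (PySem.Dict.counter (pvQC research 0 k)).keys.Nodup := by
    rw [PySem.Dict.keys_counter]
    exact PySem.Set.nodup_ofList _
  have hgd := PySem.Dict.getD_of_mem_items (PySem.Dict.counter (pvQC research 0 k))
    (by rw [Prod.mk.eta]; exact hp) hnd 0
  apply pvFind_ne_none
  refine ⟨p.1, ?_, by rw [hgd]; exact hpM⟩
  rw [PySem.List.mem_sorted]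
  exact List.mem_map.2 ⟨p, hp, rfl⟩
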